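-- pv_equiv track=rewrite | github.com/dichenko/stepic_python | diff/07dec.py | obrabotka1
-- ===== SOURCE A (Python) =====
-- def obrabotka1(m):
--     """
--     принимаем на вход строку, режем по скобкам, возвращаем список
--     :param m:
--     :return: list_
--     """
--     a = []
--     while len(m) > 0:
--         s = ''
--         while len(m) > 0 and m[0] != '[':
--             s += m[0]
--             m = m[1:]
--         m = m[1:]
--         a.append(s)
--         s = ''
--         while len(m) > 0 and m[0] != ']':
--             s += m[0]
--             m = m[1:]
--         a.append(s)
--         m = m[1:]
--
--     return a[:-1]
-- ===== SOURCE B (Python) =====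
-- def obrabotka1(m):
--     """Single pass with an index pointer (no repeated slicing): scan for '[' and ']'
--     alternately with str.find, pad to an even count, drop the last segment."""
--     parts = []
--     i = 0
--     n = len(m)
--     want = '['
--     while i < n:
--         j = m.find(want, i)
--         if j == -1:
--             j = n
--         parts.append(m[i:j])
--         i = j + 1
--         want = ']' if want == '[' else '['
--     if len(parts) % 2 == 1:
--         parts.append('')
--     return parts[:-1]
-- ===== Notes on version B (the rewrite author's own statement) =====
-- stated objective: faster
-- what changed: Replaced A's nested while loops that rebuild the string by repeated one-character slicing (m = m[1:]) and char-by-char concatenation with a single left-to-right pass using an index pointer and str.find for '[' and ']' alternately, padding the segment list to an even length before dropping the last segment.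
import Mathlib
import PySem

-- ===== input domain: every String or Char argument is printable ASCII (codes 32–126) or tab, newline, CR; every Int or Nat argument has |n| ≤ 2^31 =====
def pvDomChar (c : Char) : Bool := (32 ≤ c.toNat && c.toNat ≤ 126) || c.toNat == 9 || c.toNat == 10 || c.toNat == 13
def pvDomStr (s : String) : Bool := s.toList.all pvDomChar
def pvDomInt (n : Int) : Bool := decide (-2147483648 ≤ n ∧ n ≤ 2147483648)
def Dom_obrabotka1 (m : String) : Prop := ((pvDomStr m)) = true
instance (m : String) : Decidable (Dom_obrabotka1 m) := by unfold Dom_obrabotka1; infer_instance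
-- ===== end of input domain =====

-- B replaces A's quadratic repeated-slicing scans by a single left-to-right pass that
-- looks for '[' and ']' alternately (objective: faster, asymptotic).

-- ===== PORT A =====
-- inner while of A: `while len(m) > 0 and m[0] != c: s += m[0]; m = m[1:]`
-- (strings are carried as List Char; s is the accumulator, returns (s, remaining m))
def pvScanUntil (c : Char) (s : List Char) (m : List Char) : List Char × List Char :=
  match m with
  | [] => (s, [])
  | x :: xs => if x ≠ c then pvScanUntil c (s ++ [x]) xs else (s, x :: xs)

theorem pvScanUntil_snd_le (c : Char) (s m : List Char) :
    (pvScanUntil c s m).2.length ≤ m.length := by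
  induction m generalizing s with
  | nil => simp [pvScanUntil]
  | cons x xs ih =>
      simp only [pvScanUntil]
      split
      · exact le_trans (ih _) (by simp)
      · simp

-- outer while of A, with the accumulator list a; each iteration appends two segments
def pvOuterA (a : List (List Char)) (m : List Char) : List (List Char) :=
  if _h : m.length > 0 then
    let p1 := pvScanUntil '[' [] m          -- first inner while
    let m2 := p1.2.drop 1                   -- m = m[1:]
    let p2 := pvScanUntil ']' [] m2         -- second inner while
    pvOuterA (a ++ [p1.1] ++ [p2.1]) (p2.2.drop 1)   -- a.append(s); a.append(s); m = m[1:]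
  else a
termination_by m.length
decreasing_by
  have h1 := pvScanUntil_snd_le '[' [] m
  have h2 := pvScanUntil_snd_le ']' [] ((pvScanUntil '[' [] m).2.drop 1)
  simp only [List.length_drop] at *
  omega

-- a[:-1] is List.dropLast (exact for every list)
def obrabotka1 (m : String) : List String :=
  ((pvOuterA [] m.toList).dropLast).map String.ofList

-- ===== PORT B =====
def pvToggle (c : Char) : Char := if c = '[' then ']' else '['   -- want = ']' if want == '[' else '['

-- the while loop of Source B: `j = m.find(want, i)` + slice m[i:j] is List.span (· != want);
-- i = j + 1 is .drop 1 of the remainder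
def pvSplitAlt (m : List Char) (want : Char) : List (List Char) :=
  match m with
  | [] => []
  | x :: xs =>
      let p := (x :: xs).span (fun y => y != want)
      p.1 :: pvSplitAlt (p.2.drop 1) (pvToggle want)
termination_by m.length
decreasing_by
  simp only [List.span_eq_takeWhile_dropWhile, List.length_drop]
  have := List.length_dropWhile_le (fun y => y != want) (x :: xs)
  simp at this ⊢; omega

-- `if len(parts) % 2 == 1: parts.append('')`
def pvPad (parts : List (List Char)) : List (List Char) :=
  if parts.length % 2 = 1 then parts ++ [[]] else parts

def obrabotka1_alt (m : String) : List String :=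
  ((pvPad (pvSplitAlt m.toList '[')).dropLast).map String.ofList

-- ===== PRECONDITION & SPEC =====
def Spec_obrabotka1 (m : String) (out : List String) : Prop := out = obrabotka1_alt m
instance (m : String) (out : List String) : Decidable (Spec_obrabotka1 m out) := by unfold Spec_obrabotka1; infer_instance

-- ===== CLAIM (what is proved, stated in full; the proofs are below) =====
def Claim_equal_obrabotka1 : Prop := ∀ (m : String), Dom_obrabotka1 m → Spec_obrabotka1 m (obrabotka1 m)

-- ===== LEMMAS AND PROOFS =====

theorem pvScanUntil_eq (c : Char) (s m : List Char) :
    pvScanUntil c s m =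
      (s ++ m.takeWhile (fun y => y != c), m.dropWhile (fun y => y != c)) := by
  induction m generalizing s with
  | nil => simp [pvScanUntil]
  | cons x xs ih =>
      simp only [pvScanUntil]
      by_cases hx : x = c
      · simp [hx]
      · simp [hx, ih, List.append_assoc]

theorem pvOuterA_acc (n : Nat) (a : List (List Char)) (m : List Char) (hm : m.length ≤ n) :
    pvOuterA a m = a ++ pvOuterA [] m := by
  induction n generalizing a m with
  | zero =>
      have : m = [] := by
        cases m with
        | nil => rfl
        | cons x xs => simp at hm
      subst this
      simp [pvOuterA]
  | succ n ih =>
      by_cases h : m.length > 0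
      · conv_lhs => rw [pvOuterA]
        conv_rhs => rw [pvOuterA]
        simp only [h, dite_true]
        have h1 := pvScanUntil_snd_le '[' [] m
        have h2 := pvScanUntil_snd_le ']' [] ((pvScanUntil '[' [] m).2.drop 1)
        have hlen : ((pvScanUntil ']' [] ((pvScanUntil '[' [] m).2.drop 1)).2.drop 1).length ≤ n := by
          simp only [List.length_drop] at *
          omega
        rw [ih _ _ hlen]
        conv_rhs => rw [ih _ _ hlen]
        simp [List.append_assoc]
      · have : m = [] := by
          cases m with
          | nil => rfl
          | cons x xs => simp at h
        subst this
        simp [pvOuterA]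

theorem pvPad_cons_cons (a b : List Char) (L : List (List Char)) :
    pvPad (a :: b :: L) = a :: b :: pvPad L := by
  unfold pvPad
  by_cases h : L.length % 2 = 1 <;> simp only [List.length_cons] <;>
    first
      | (rw [if_pos (by omega), if_pos h])
      | (rw [if_neg (by omega), if_neg h])
  simp

theorem pvMain (n : Nat) (m : List Char) (hm : m.length ≤ n) :
    pvOuterA [] m = pvPad (pvSplitAlt m '[') := by
  induction n generalizing m with
  | zero =>
      have : m = [] := by
        cases m with
        | nil => rfl
        | cons x xs => simp at hm
      subst this
      simp [pvOuterA, pvSplitAlt, pvPad]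
  | succ n ih =>
      cases m with
      | nil => simp [pvOuterA, pvSplitAlt, pvPad]
      | cons x xs =>
        rw [pvOuterA]
        simp only [List.length_cons, Nat.succ_le_iff] at hm
        have hpos : (x :: xs).length > 0 := by simp
        simp only [hpos, dite_true]
        rw [pvSplitAlt]
        simp only [List.span_eq_takeWhile_dropWhile, pvScanUntil_eq, List.nil_append]
        set m2 := ((x :: xs).dropWhile (fun y => y != '[')).drop 1 with hm2
        have hm2len : m2.length ≤ xs.length := by
          have := List.length_dropWhile_le (fun y => y != '[') (x :: xs)
          simp only [hm2, List.length_drop]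
          simp only [List.length_cons] at this
          omega
        have htog : pvToggle '[' = ']' := by decide
        rw [htog]
        cases hm2c : m2 with
        | nil =>
            simp only [hm2c] at *
            rw [pvOuterA_acc (n := xs.length) _ _ (by simp)]
            simp [pvOuterA, pvSplitAlt, pvPad, List.takeWhile, List.dropWhile]
        | cons y ys =>
            rw [pvSplitAlt]
            simp only [List.span_eq_takeWhile_dropWhile]
            have htog2 : pvToggle ']' = '[' := by decide
            rw [htog2, pvPad_cons_cons]
            set m3 := ((y :: ys).dropWhile (fun y => y != ']')).drop 1 with hm3
            have hm3len : m3.length ≤ n := by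
              have := List.length_dropWhile_le (fun y => y != ']') (y :: ys)
              have hyl : (y :: ys).length ≤ xs.length := by rw [← hm2c]; exact hm2len
              simp only [hm3, List.length_drop]
              simp only [List.length_cons] at this hyl
              omega
            rw [pvOuterA_acc (n := n) _ _ hm3len, ih _ hm3len]
            simp

-- ===== VERDICT (by name: the statement is the Claim_ definition above) =====
theorem obrabotka1_spec : Claim_equal_obrabotka1 := by
  intro m _
  unfold Spec_obrabotka1 obrabotka1 obrabotka1_alt
  rw [pvMain m.toList.length m.toList le_rfl]
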